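-- pv_equiv track=rewrite | github.com/suyeonnii/Algorithm | 프로그래머스/0/181856. 배열 비교하기/배열 비교하기.py | solution
-- ===== SOURCE A (Python) =====
-- def solution(arr1, arr2):
--     sum1=0
--     sum2=0
--
--     if len(arr1)==len(arr2):
--         for num in arr1:
--             sum1+=num
--         for num in arr2:
--             sum2+=num
--         if sum1>sum2:
--             return 1
--         elif sum1==sum2:
--             return 0
--         else:
--             return -1
--     else:
--         if len(arr1)>len(arr2):
--             return 1
--         else:
--             return -1
-- ===== SOURCE B (Python) =====
-- def solution(arr1, arr2):
--     d = 0
--     i = 0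
--     while i < len(arr1) and i < len(arr2):
--         d += arr1[i] - arr2[i]
--         i += 1
--     if i < len(arr1):
--         return 1
--     if i < len(arr2):
--         return -1
--     return (d > 0) - (d < 0)
-- ===== Notes on version B (the rewrite author's own statement) =====
-- stated objective: alternative
-- what changed: Replaces A's length-first branching with separate summing loops by one simultaneous pairwise walk that accumulates the element-wise difference; the list left unexhausted decides the sign, otherwise the sign of the accumulated difference.
import Mathlib
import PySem

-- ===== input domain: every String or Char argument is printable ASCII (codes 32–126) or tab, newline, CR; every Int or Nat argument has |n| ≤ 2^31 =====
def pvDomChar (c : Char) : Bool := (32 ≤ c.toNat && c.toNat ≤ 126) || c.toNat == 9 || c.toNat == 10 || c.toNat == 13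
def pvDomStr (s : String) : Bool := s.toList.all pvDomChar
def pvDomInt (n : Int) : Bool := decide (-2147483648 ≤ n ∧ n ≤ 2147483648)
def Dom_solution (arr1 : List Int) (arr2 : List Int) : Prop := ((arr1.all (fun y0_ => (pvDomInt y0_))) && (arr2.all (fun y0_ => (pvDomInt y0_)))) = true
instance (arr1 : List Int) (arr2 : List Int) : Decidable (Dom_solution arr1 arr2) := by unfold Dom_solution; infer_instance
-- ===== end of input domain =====

-- B replaces A's length-first branching and summing loops by one simultaneous pairwise walk accumulating the element-wise difference (alternative decomposition).
-- ===== PORT A =====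
def solution (arr1 : List Int) (arr2 : List Int) : Int :=
  let sum1 : Int := 0
  let sum2 : Int := 0
  if arr1.length = arr2.length then
    let sum1 := arr1.foldl (fun s num => s + num) sum1
    let sum2 := arr2.foldl (fun s num => s + num) sum2
    if sum1 > sum2 then 1
    else if sum1 = sum2 then 0
    else -1
  else
    if arr1.length > arr2.length then 1 else -1
-- ===== PORT B =====
-- Source B's while loop walks both lists in step; here the same walk as structural recursion on both lists with the accumulator d
def pvWalk : List Int → List Int → Int → Int
  | x :: xs, y :: ys, d => pvWalk xs ys (d + x - y)
  | _ :: _, [], _ => 1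
  | [], _ :: _, _ => -1
  | [], [], d => (if d > 0 then (1 : Int) else 0) - (if d < 0 then 1 else 0)
def solution_alt (arr1 : List Int) (arr2 : List Int) : Int := pvWalk arr1 arr2 0
-- ===== PRECONDITION & SPEC =====
def Spec_solution (arr1 : List Int) (arr2 : List Int) (out : Int) : Prop := out = solution_alt arr1 arr2
instance (arr1 : List Int) (arr2 : List Int) (out : Int) : Decidable (Spec_solution arr1 arr2 out) := by unfold Spec_solution; infer_instance
-- ===== CLAIM (what is proved, stated in full; the proofs are below) =====
def Claim_equal_solution : Prop := ∀ (arr1 : List Int) (arr2 : List Int), Dom_solution arr1 arr2 → Spec_solution arr1 arr2 (solution arr1 arr2)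
-- ===== LEMMAS AND PROOFS =====
theorem pvWalk_char (xs ys : List Int) (d : Int) :
    pvWalk xs ys d =
      if xs.length = ys.length then
        (if d + xs.sum > ys.sum then (1 : Int) else if d + xs.sum = ys.sum then 0 else -1)
      else if xs.length > ys.length then 1 else -1 := by
  induction xs generalizing ys d with
  | nil =>
    cases ys with
    | nil => simp [pvWalk]; omega
    | cons y ys => simp [pvWalk]
  | cons x xs ih =>
    cases ys with
    | nil => simp [pvWalk]
    | cons y ys =>
      simp only [pvWalk, ih, List.length_cons, List.sum_cons]
      split_ifs <;> first | rfl | omega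
theorem foldl_add_eq_sum (l : List Int) (a : Int) : l.foldl (fun s num => s + num) a = a + l.sum := by
  induction l generalizing a with
  | nil => simp
  | cons x xs ih => simp [List.foldl, ih, List.sum_cons]; ring
-- ===== VERDICT (by name: the statement is the Claim_ definition above) =====
theorem solution_spec : Claim_equal_solution := by
  intro arr1 arr2 _
  unfold Spec_solution solution solution_alt
  rw [pvWalk_char]
  simp only [foldl_add_eq_sum, zero_add]
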